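/-
  THE SPLIT OF decode_residue.6b (the body proper of the i-loop 2229 of decode_residue, path A, `ch > 2`, `r` in r12) at the call arm.

  The claim `DecodeResidue.Seg6b` of Vorbis/Spec/DecodeResidue46.lean is unchanged. This file has the assertion at the one cut point
  INSIDE the unit, the two children's claims and the composition (pure `ReachVia` logic: no code is walked here). It is the twin of
  the split of segment 4 into `Seg4a` / `Seg4b` at 0x10f141 (`AtB L.decode_residue.at_10f141`), for the variant `ch > 2`.

      decode_residue.6b  (0x10f579 … 0x10f634 + 0x10f4ed … 0x10f54d + 0x10f639 … 0x10f640)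
      AtCall6                    0x10f4ed (`L.decode_residue.at_10f4ed`: `mov r14, [rbp−0xb0]`), the target of `je 10f4ed` at 0x10f613: the
                                 call arm, `b = residue_books[c][pass]` in ebx with bit 15 clear
      Seg6ba                     THE FRONT, THE `b < 0` ARM AND THE LATCH: 0x10f579 … 0x10f634 + 0x10f549 … 0x10f54d (seven check sites,
                                 the `idiv` at 0x10f628, no contract call)
      Seg6bb                     THE CALL ARM: 0x10f4ed … 0x10f54d + 0x10f639 … 0x10f640 (one check site, the call of
                                 codebook_decode_deinterleave_repeat at 0x10f538, the latch, `goto done`)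
      Seg6b.of_parts             Seg6ba → Seg6bb → Seg6b

  Slots as in Vorbis/Spec/DecodeResidue.lean: `rbp = RA − 8`, so `[rbp − X]` is `[g.e.rsp − (X + 8)]`.
-/
import Vorbis.Spec.DecodeResidue46
namespace Vorbis.Spec
open X86 X86.User Asan

namespace DecodeResidue

/-! ### The assertion at 0x10f4ed -/

/-- **0x10f4ed (`L.decode_residue.at_10f4ed`: `mov r14, QWORD PTR [rbp−0xb0]`, C 2238 `Codebook *book = f->codebooks + b`), the call
arm of the i-loop 2229** (`ch > 2`), reached only by the `je` at 0x10f613 after `test bx, 0x8000`: bit 15 of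
`b = r->residue_books[c][pass]` is clear. Everything of `AtTurn` is still there: between 0x10f579 and the `je` the code stores to
`[rbp−0xb8]` (0x10f594), to `[rbp−0x98]` (0x10f5a1) and, by the seven check calls, to the return-address slot `[RA−256, RA−248)`
below the steady stack pointer: no slot of COMMON, of `PathA`, no `class_set`, no byte of the two ints, of `*f`, of the temp
block; r12, r13, r15 are not written. New against `AtTurn`: `[rbp−0xb8] = r->part_size`, `ebx = b`, `b < 2^15`, R8c for `b`.
NOT asserted, because dead in the call arm: `[rbp−0x98]` (= `z`, read only by the `b < 0` arm at 0x10f61f), r14 (the sign-extended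
`pass`; overwritten by the arm's first instruction), rax, rcx, rdx, rsi, rdi, the flags.
Read by the call arm: `[rbp−0xb0]` = f (`Common.fr_f`, 0x10f4ed), bx (0x10f500), `[rbp−0xb8]` (`sl_psz`, 0x10f515), `[rbp−0xc8]` = n
(`PathA.sl_n`, 0x10f51c), `[rbp−0x94]` = ch (`Common.fr_ch`, 0x10f52b), `[rbp−0xd0]` = residue_buffers (`Common.fr_rb`, 0x10f531),
r13d / r15d (the latch 0x10f549 / 0x10f54d), `[rbp−0xdc]` = tap (`PathA.sl_tap`, 0x10f639). -/
structure AtCall6 (u₀ : State) (g : G) (pass cs i pcount b : Nat) (v : State) : Prop where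
  /-- at the first instruction of the call arm -/
  rip : v.rip = L.decode_residue.at_10f4ed
  /-- COMMON (`rsp` is the steady stack pointer again: every check call has returned) -/
  common : Common u₀ g v
  /-- this is the variant `ch > 2` -/
  ch3 : 3 ≤ g.ch
  /-- `r12 = r`, the residue record (not written in the body; callee-saved over the call) -/
  r12 : v.reg .r12 = UInt64.ofNat g.r
  /-- path A: `rtype = 2`, `[rbp−0xa0] = pass`, `[rbp−0xdc] = tap`, `[rbp−0xc8] = n` -/
  path : PathA g pass v
  /-- `r15d = pcount` -/
  r15 : v.reg .r15 = UInt64.ofNat pcount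
  /-- `r13d = i` -/
  r13 : v.reg .r13 = UInt64.ofNat i
  /-- `[rbp−0xd8] = class_set` -/
  sl_cs : v.mem.readLE (g.e.reg .rsp - 224) 4 = cs
  /-- the invariant of the i-loop, still for `(i, pcount)`: the latch comes after the call -/
  wi : WInnerInv v.mem g.f g.r g.TB g.C g.PRD g.W g.rowsA pass cs i pcount
  /-- CI on `c_inter` (`[rbp−0x60]`), `p_inter` (`[rbp−0x50]`): not stored to since the loop head -/
  inter : InterAt v.mem g.ci g.pi g.ch g.n
  /-- `i < classwords` -/
  i_lt : i < g.W
  /-- `pcount < part_read` -/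
  lt : pcount < g.PRD
  /-- `[rbp−0xb8] = r->part_size` (the record's field as at the function's entry): stored at 0x10f594, read again at 0x10f515
  (`mov eax, [rbp−0xb8] ; push rax`, the callee's eighth argument `total_decode`) -/
  sl_psz : v.mem.readLE (g.e.reg .rsp - 192) 4 = Residue.part_size g.e.mem g.r
  /-- `rbx = b`, zero-extended from 16 bits (`movzx ebx, WORD PTR [rbx + r14·2]` at 0x10f609); read at 0x10f500 (`movsx rsi, bx`) -/
  rbx : v.reg .rbx = UInt64.ofNat b
  /-- bit 15 of `b` is clear (`test bx, 0x8000 ; je` taken): `b` is its own signed 16-bit reading -/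
  b_lt : b < 32768
  /-- R8c: `b = residue_books[c][pass]`, being non-negative, is a codebook number -/
  book : (b : Int) < stb_vorbis.codebook_count v.mem g.f

/-! ### The children's claims -/

/-- **decode_residue.6ba** (0x10f579 … 0x10f634 + 0x10f549 … 0x10f54d; C 2230–2236, 2242–2246): THE BODY PROPER OF THE i-LOOP 2229
BUT THE CALL ARM. The front 0x10f579 … 0x10f613: `z = r->begin + pcount·r->part_size` (two checks of the record; `part_size` kept
in `[rbp−0xb8]`, `z` in `[rbp−0x98]`), the class number `c = part_classdata[0][class_set][i]` (three checks), the book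
`b = r->residue_books[c][pass]` (two checks), `test bx, 0x8000`. Bit 15 clear: the call arm at 0x10f4ed with nothing else changed
(`AtCall6`). Bit 15 set (`b < 0`): `z += part_size`, `cdq ; idiv ch` at 0x10f628 (no `#DE`: fact K), `c_inter := z % ch`,
`p_inter := z / ch`, CI again; `jmp 10f549`, the latch `++i, ++pcount`: the loop head 0x10f551. No contract call. -/
def Seg6ba (Lay : Layout) (μ : Microarch) (u₀ : State) : Prop :=
  ∀ g : G, Entered u₀ g →
    ∀ pass cs i pcount v, AtTurn u₀ g pass cs i pcount v →
      ReachVia Lay μ WayInv v (fun v' =>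
        (∃ b, AtCall6 u₀ g pass cs i pcount b v') ∨ AtInner u₀ g pass cs (i + 1) (pcount + 1) v')

/-- **decode_residue.6bb** (0x10f4ed … 0x10f54d + 0x10f639 … 0x10f640; C 2238–2241): THE CALL ARM of the i-loop 2229, `b ≥ 0`:
`book = f->codebooks + b` (one check site, 0x10f4fb: the load of `f->codebooks`; `movsx rsi, bx ; imul rsi, 0x848`), the two pushed
arguments `part_size`, `n`, the call of codebook_decode_deinterleave_repeat at 0x10f538 (`cut20` = 0x10f53d is its return address);
result 1: the latch `++i, ++pcount` and the loop head 0x10f551 with CI again (`DeintPost.one`); result 0: `goto done` through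
0x10f639 (`mov r15d, [rbp−0xdc]`). `Common.same` after the call: `Entered.same_through_deint` (Vorbis/Spec/DecodeResidueCarry.lean). -/
def Seg6bb (Lay : Layout) (μ : Microarch) (u₀ : State) : Prop :=
  ∀ g : G, Entered u₀ g →
    ∀ pass cs i pcount b v, AtCall6 u₀ g pass cs i pcount b v →
      ReachVia Lay μ WayInv v (fun v' => AtInner u₀ g pass cs (i + 1) (pcount + 1) v' ∨ At32 u₀ g v')

/-! ### The composition -/

/-- **decode_residue.6b from its two parts**: 6ba = the front, the `b < 0` arm and the latch; 6bb = the call arm. No loop inside the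
unit: the induction on `PRD − pcount` is `Seg6.inner_runs`, above this level. -/
theorem Seg6b.of_parts {Lay : Layout} {μ : Microarch} {u₀ : State} (ha : Seg6ba Lay μ u₀) (hb : Seg6bb Lay μ u₀) :
    Seg6b Lay μ u₀ := by
  intro g hent pass cs i pcount v hturn
  refine (ha g hent pass cs i pcount v hturn).trans ?_
  intro v1 h1
  rcases h1 with ⟨b, hcall⟩ | hinner
  · exact hb g hent pass cs i pcount b v1 hcall
  · exact ReachVia.done (Or.inl hinner)

end DecodeResidue

end Vorbis.Spec
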